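-- pv_equiv track=rewrite | github.com/Nebsorg/AdventOfCode | 2023/tools.py | interval_spread_included
-- ===== SOURCE A (Python) =====
-- def interval_intersection(i1,i2):
--     xmin = min(i1[0],i1[1])
--     xmax = max(i1[0],i1[1])
--     ymin = min(i2[0],i2[1])
--     ymax = max(i2[0],i2[1])
--
--     if (ymin > xmax) or (xmin > ymax):
--         return([])
--
--     imin = max(xmin, ymin)
--     imax = min(xmax, ymax)
--     return([imin, imax])
--
-- def interval_spread_included(i1,i2):
--     result = []
--     intersection = interval_intersection(i1,i2)
--     if len(intersection) == 0:
--         result.append(i1)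
--         result.append(i2)
--         return(result)
--
--     values = []
--     values.extend(i1)
--     values.extend(i2)
--     values.extend(intersection)
--
--     ## return the new intervals :
--     values = sorted(values)
--     for i in range(0, len(values), 2):
--         result.append([values[i], values[i+1]])
--     return(result)
-- ===== SOURCE B (Python) =====
-- def interval_spread_included(i1, i2):
--     xmin, xmax = min(i1[0], i1[1]), max(i1[0], i1[1])
--     ymin, ymax = min(i2[0], i2[1]), max(i2[0], i2[1])
--     if ymin > xmax or xmin > ymax:
--         return [i1, i2]
--     vals = sorted(i1 + i2)
--     # merge the two intersection bounds into the sorted values by one linear pass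
--     merged = []
--     k = 0
--     for v in (max(xmin, ymin), min(xmax, ymax)):
--         while k < len(vals) and vals[k] <= v:
--             merged.append(vals[k])
--             k += 1
--         merged.append(v)
--     merged.extend(vals[k:])
--     # group consecutive pairs
--     it = iter(merged)
--     return [[a, b] for a, b in zip(it, it)]
-- ===== Notes on version B (the rewrite author's own statement) =====
-- stated objective: alternative
-- what changed: Instead of concatenating all values with the intersection bounds, re-sorting, and pairing with an index-stepping range loop, B sorts the endpoint values once, splices the two intersection bounds in with a linear merge pass, and pairs consecutive values with an iterator.
import Mathlib
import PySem

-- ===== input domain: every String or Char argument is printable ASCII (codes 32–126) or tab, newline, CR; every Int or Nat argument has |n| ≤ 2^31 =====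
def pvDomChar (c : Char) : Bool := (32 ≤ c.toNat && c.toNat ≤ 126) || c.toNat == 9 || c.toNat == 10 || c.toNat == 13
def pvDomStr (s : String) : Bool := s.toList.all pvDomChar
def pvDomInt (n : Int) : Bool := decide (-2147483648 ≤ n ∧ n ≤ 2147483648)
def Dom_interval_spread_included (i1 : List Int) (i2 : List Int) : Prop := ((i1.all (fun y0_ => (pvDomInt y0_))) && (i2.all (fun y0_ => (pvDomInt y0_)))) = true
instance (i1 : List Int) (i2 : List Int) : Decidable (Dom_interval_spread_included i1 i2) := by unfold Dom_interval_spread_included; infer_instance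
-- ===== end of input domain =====

-- B sorts the endpoint values once and merges the two intersection bounds in with a linear pass,
-- pairing consecutive values with an iterator (objective: alternative); A is ported literally.

-- ===== PORT A =====
-- helper: interval_intersection(i1, i2); none = IndexError on a list shorter than 2
def pvIntersection (i1 : List Int) (i2 : List Int) : Option (List Int) :=
  match PySem.List.pyGet? i1 0, PySem.List.pyGet? i1 1, PySem.List.pyGet? i2 0, PySem.List.pyGet? i2 1 with
  | some a, some b, some c, some d =>
      let xmin := min a b
      let xmax := max a b
      let ymin := min c d
      let ymax := max c d
      if ymin > xmax ∨ xmin > ymax then some []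
      else some [max xmin ymin, min xmax ymax]
  | _, _, _, _ => none

-- the pairing loop 'for i in range(0, len(values), 2): result.append([values[i], values[i+1]])';
-- none = IndexError at values[i+1] on an odd-length list
def pvPairLoop : List Int → Option (List (List Int))
  | [] => some []
  | [_] => none
  | a :: b :: rest => (pvPairLoop rest).map (fun r => [a, b] :: r)

def interval_spread_included (i1 : List Int) (i2 : List Int) : List (List Int) :=
  match pvIntersection i1 i2 with
  | none => []   -- A raises here; excluded by Pre_
  | some inter =>
    if inter.length = 0 then [i1, i2]
    else (pvPairLoop (PySem.List.sorted (i1 ++ i2 ++ inter) (fun x => x) false)).getD []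

-- ===== PORT B =====
-- the inner 'while k < len(vals) and vals[k] <= v' advance: (elements appended, remaining suffix)
def pvEmit : List Int → Int → (List Int × List Int)
  | [], _ => ([], [])
  | x :: r, v =>
      if x ≤ v then
        let tr := pvEmit r v
        (x :: tr.1, tr.2)
      else ([], x :: r)

-- 'it = iter(merged); [[a, b] for a, b in zip(it, it)]'
def pvPairUp : List Int → List (List Int)
  | a :: b :: rest => [a, b] :: pvPairUp rest
  | _ => []

def interval_spread_included_alt (i1 : List Int) (i2 : List Int) : List (List Int) :=
  match PySem.List.pyGet? i1 0, PySem.List.pyGet? i1 1, PySem.List.pyGet? i2 0, PySem.List.pyGet? i2 1 with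
  | some a, some b, some c, some d =>
      let xmin := min a b
      let xmax := max a b
      let ymin := min c d
      let ymax := max c d
      if ymin > xmax ∨ xmin > ymax then [i1, i2]
      else
        let vals := PySem.List.sorted (i1 ++ i2) (fun x => x) false
        let e1 := pvEmit vals (max xmin ymin)
        let e2 := pvEmit e1.2 (min xmax ymax)
        pvPairUp (e1.1 ++ max xmin ymin :: (e2.1 ++ min xmax ymax :: e2.2))
  | _, _, _, _ => []   -- B raises here (IndexError); excluded by Pre_

-- ===== PRECONDITION & SPEC =====
-- Pre_ excludes exactly the inputs on which A raises IndexError: a list shorter than 2, and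
-- overlapping intervals whose total number of elements is odd (the pairing loop runs off the end).
def Pre_interval_spread_included (i1 : List Int) (i2 : List Int) : Prop :=
  2 ≤ i1.length ∧ 2 ≤ i2.length ∧
    (min (i2.getD 0 0) (i2.getD 1 0) > max (i1.getD 0 0) (i1.getD 1 0) ∨
     min (i1.getD 0 0) (i1.getD 1 0) > max (i2.getD 0 0) (i2.getD 1 0) ∨
     (i1.length + i2.length) % 2 = 0)
instance (i1 : List Int) (i2 : List Int) : Decidable (Pre_interval_spread_included i1 i2) := by
  unfold Pre_interval_spread_included; infer_instance

def pvWitness_interval_spread_included : List Int × List Int := ([1, 5], [3, 8])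

def Spec_interval_spread_included (i1 : List Int) (i2 : List Int) (out : List (List Int)) : Prop := out = interval_spread_included_alt i1 i2
instance (i1 : List Int) (i2 : List Int) (out : List (List Int)) : Decidable (Spec_interval_spread_included i1 i2 out) := by unfold Spec_interval_spread_included; infer_instance

-- ===== CLAIM (what is proved, stated in full; the proofs are below) =====
def Claim_equal_interval_spread_included : Prop := ∀ (i1 : List Int) (i2 : List Int), Dom_interval_spread_included i1 i2 → Pre_interval_spread_included i1 i2 → Spec_interval_spread_included i1 i2 (interval_spread_included i1 i2)
-- ===== LEMMAS AND PROOFS =====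

lemma pvGetPair (a b : Int) (t : List Int) :
    PySem.List.pyGet? (a :: b :: t) 0 = some a ∧ PySem.List.pyGet? (a :: b :: t) 1 = some b := by
  constructor <;> simp [PySem.List.pyGet?, PySem.List.pyIdx?] <;> rw [if_pos (by omega)] <;> simp

-- both ports on disjoint intervals: the empty-intersection branch
lemma pvADisj (a b c d : Int) (t u : List Int) (h : min c d > max a b ∨ min a b > max c d) :
    interval_spread_included (a :: b :: t) (c :: d :: u) = [a :: b :: t, c :: d :: u] := by
  have hi : pvIntersection (a :: b :: t) (c :: d :: u) = some [] := by
    unfold pvIntersection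
    rw [(pvGetPair a b t).1, (pvGetPair a b t).2, (pvGetPair c d u).1, (pvGetPair c d u).2]
    simp only
    rw [if_pos h]
  unfold interval_spread_included
  rw [hi]
  rfl

lemma pvBDisj (a b c d : Int) (t u : List Int) (h : min c d > max a b ∨ min a b > max c d) :
    interval_spread_included_alt (a :: b :: t) (c :: d :: u) = [a :: b :: t, c :: d :: u] := by
  unfold interval_spread_included_alt
  rw [(pvGetPair a b t).1, (pvGetPair a b t).2, (pvGetPair c d u).1, (pvGetPair c d u).2]
  simp only
  rw [if_pos h]

-- port A on overlapping intervals: the sort-and-pair branch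
lemma pvAOver (a b c d : Int) (t u : List Int) (h : ¬(min c d > max a b ∨ min a b > max c d)) :
    interval_spread_included (a :: b :: t) (c :: d :: u)
    = (pvPairLoop (PySem.List.sorted ((a :: b :: t) ++ (c :: d :: u) ++
        [max (min a b) (min c d), min (max a b) (max c d)]) (fun x => x) false)).getD [] := by
  have hi : pvIntersection (a :: b :: t) (c :: d :: u)
      = some [max (min a b) (min c d), min (max a b) (max c d)] := by
    unfold pvIntersection
    rw [(pvGetPair a b t).1, (pvGetPair a b t).2, (pvGetPair c d u).1, (pvGetPair c d u).2]
    simp only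
    rw [if_neg h]
  unfold interval_spread_included
  rw [hi]
  rfl

-- the while-loop advance is takeWhile/dropWhile
lemma pvEmit_eq (l : List Int) (v : Int) :
    pvEmit l v = (l.takeWhile (fun x => x ≤ v), l.dropWhile (fun x => x ≤ v)) := by
  induction l with
  | nil => rfl
  | cons x r ih =>
    by_cases h : x ≤ v
    · simp [pvEmit, h, ih]
    · simp [pvEmit, h]

-- B's merged list: the two bounds spliced into the sorted values
def pvMerged (w : List Int) (p q : Int) : List Int :=
  (PySem.List.sorted w (fun x => x) false).takeWhile (fun x => x ≤ p) ++
    p :: (((PySem.List.sorted w (fun x => x) false).dropWhile (fun x => x ≤ p)).takeWhile (fun x => x ≤ q) ++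
      q :: ((PySem.List.sorted w (fun x => x) false).dropWhile (fun x => x ≤ p)).dropWhile (fun x => x ≤ q))

-- port B on overlapping intervals: merge the two bounds into the sorted values, then pair up
lemma pvBOver (a b c d : Int) (t u : List Int) (h : ¬(min c d > max a b ∨ min a b > max c d)) :
    interval_spread_included_alt (a :: b :: t) (c :: d :: u)
    = pvPairUp (pvMerged ((a :: b :: t) ++ (c :: d :: u)) (max (min a b) (min c d)) (min (max a b) (max c d))) := by
  unfold interval_spread_included_alt pvMerged
  rw [(pvGetPair a b t).1, (pvGetPair a b t).2, (pvGetPair c d u).1, (pvGetPair c d u).2]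
  simp only
  rw [if_neg h]
  simp only [pvEmit_eq]

-- on a sorted list, everything the while loop leaves behind is strictly above v
lemma pvDropWhile_gt (l : List Int) (hl : l.Pairwise (· ≤ ·)) (v : Int) :
    ∀ y ∈ l.dropWhile (fun x => x ≤ v), v < y := by
  induction l with
  | nil => simp
  | cons x r ih =>
    rw [List.pairwise_cons] at hl
    by_cases h : x ≤ v
    · simpa [List.dropWhile_cons, h] using ih hl.2
    · simp only [List.dropWhile_cons, decide_eq_true_eq, h, if_false]
      intro y hy
      rcases List.mem_cons.mp hy with rfl | hy
      · omega
      · have := hl.1 y hy; omega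

-- everything the while loop emits is at most v
lemma pvTakeWhile_le (l : List Int) (v : Int) :
    ∀ y ∈ l.takeWhile (fun x => x ≤ v), y ≤ v := by
  intro y hy
  simpa using List.mem_takeWhile_imp hy

-- the merged list is a rearrangement of l ++ [p, q]
lemma pvMergedPerm (l : List Int) (p q : Int) :
    ((l.takeWhile (fun x => x ≤ p)) ++ p ::
      (((l.dropWhile (fun x => x ≤ p)).takeWhile (fun x => x ≤ q)) ++ q ::
        ((l.dropWhile (fun x => x ≤ p)).dropWhile (fun x => x ≤ q)))).Perm (l ++ [p, q]) := by
  refine List.Perm.trans (List.Perm.append_left _ (List.Perm.cons p List.perm_middle)) ?_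
  rw [List.takeWhile_append_dropWhile]
  refine List.Perm.trans
    (List.Perm.append_left _ (@List.perm_append_comm _ [p, q] (l.dropWhile (fun x => x ≤ p)))) ?_
  rw [← List.append_assoc, List.takeWhile_append_dropWhile]

-- the merged list is sorted
lemma pvMergedPairwise (l : List Int) (hl : l.Pairwise (· ≤ ·)) (p q : Int) (hpq : p ≤ q) :
    ((l.takeWhile (fun x => x ≤ p)) ++ p ::
      (((l.dropWhile (fun x => x ≤ p)).takeWhile (fun x => x ≤ q)) ++ q ::
        ((l.dropWhile (fun x => x ≤ p)).dropWhile (fun x => x ≤ q)))).Pairwise (· ≤ ·) := by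
  have hR1pw : (l.dropWhile (fun x => x ≤ p)).Pairwise (· ≤ ·) :=
    hl.sublist (List.dropWhile_sublist _)
  have hR1 : ∀ y ∈ l.dropWhile (fun x => x ≤ p), p < y := pvDropWhile_gt l hl p
  have hT2R1 : ∀ y ∈ (l.dropWhile (fun x => x ≤ p)).takeWhile (fun x => x ≤ q),
      y ∈ l.dropWhile (fun x => x ≤ p) := fun y hy => (List.takeWhile_sublist _).mem hy
  have hR2R1 : ∀ y ∈ (l.dropWhile (fun x => x ≤ p)).dropWhile (fun x => x ≤ q),
      y ∈ l.dropWhile (fun x => x ≤ p) := fun y hy => (List.dropWhile_sublist _).mem hy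
  have hR2 : ∀ y ∈ (l.dropWhile (fun x => x ≤ p)).dropWhile (fun x => x ≤ q), q < y :=
    pvDropWhile_gt _ hR1pw q
  rw [List.pairwise_append]
  refine ⟨hl.sublist (List.takeWhile_sublist _), ?_, ?_⟩
  · rw [List.pairwise_cons]
    refine ⟨?_, ?_⟩
    · intro y hy
      rcases List.mem_append.mp hy with hy | hy
      · exact le_of_lt (hR1 y (hT2R1 y hy))
      · rcases List.mem_cons.mp hy with rfl | hy
        · exact hpq
        · exact le_of_lt (hR1 y (hR2R1 y hy))
    · rw [List.pairwise_append]
      refine ⟨hR1pw.sublist (List.takeWhile_sublist _), ?_, ?_⟩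
      · rw [List.pairwise_cons]
        exact ⟨fun y hy => le_of_lt (hR2 y hy), hR1pw.sublist (List.dropWhile_sublist _)⟩
      · intro x hx y hy
        have hxq := pvTakeWhile_le _ q x hx
        rcases List.mem_cons.mp hy with rfl | hy
        · exact hxq
        · exact le_of_lt (lt_of_le_of_lt hxq (hR2 y hy))
  · intro x hx y hy
    have hxp := pvTakeWhile_le _ p x hx
    rcases List.mem_cons.mp hy with rfl | hy
    · exact hxp
    · rcases List.mem_append.mp hy with hy | hy
      · exact le_of_lt (lt_of_le_of_lt hxp (hR1 y (hT2R1 y hy)))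
      · rcases List.mem_cons.mp hy with rfl | hy
        · omega
        · exact le_of_lt (lt_of_le_of_lt hxp (hR1 y (hR2R1 y hy)))

-- A's sort of the six-plus values IS B's merged list
lemma pvSortedMerged (w : List Int) (p q : Int) (hpq : p ≤ q) :
    PySem.List.sorted (w ++ [p, q]) (fun x => x) false = pvMerged w p q := by
  have hl : (PySem.List.sorted w (fun x => x) false).Pairwise (· ≤ ·) :=
    PySem.List.sorted_pairwise w (fun x => x)
  unfold pvMerged
  apply PySem.List.sorted_id_eq_of_perm_of_pairwise
  · exact List.Perm.trans (pvMergedPerm _ p q)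
      (List.Perm.append (PySem.List.sorted_perm w (fun x => x) false) (List.Perm.refl _))
  · exact pvMergedPairwise _ hl p q hpq

-- the merged list keeps an even length when the input count is even
lemma pvMergedLen (w : List Int) (p q : Int) (h : w.length % 2 = 0) :
    (pvMerged w p q).length % 2 = 0 := by
  have h1 := (pvMergedPerm (PySem.List.sorted w (fun x => x) false) p q).length_eq
  have h2 := (PySem.List.sorted_perm w (fun x => x) false).length_eq
  unfold pvMerged
  simp only [List.length_append, List.length_cons, List.length_nil] at h1 h2 ⊢
  omega

-- A's index-stepping pair loop and B's iterator pairing agree on even-length lists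
lemma pvPairLoop_even : ∀ l : List Int, l.length % 2 = 0 → pvPairLoop l = some (pvPairUp l) := by
  intro l
  induction l using pvPairLoop.induct with
  | case1 => intro _; rfl
  | case2 x => intro h; simp at h
  | case3 a b rest ih =>
    intro h
    simp only [List.length_cons] at h
    have := ih (by omega)
    simp [pvPairLoop, pvPairUp, this]

theorem interval_spread_included_spec : Claim_equal_interval_spread_included := by
  intro i1 i2 _ hpre
  obtain ⟨h1, h2, hcase⟩ := hpre
  unfold Spec_interval_spread_included
  rcases i1 with _ | ⟨a, _ | ⟨b, t⟩⟩ <;> simp at h1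
  rcases i2 with _ | ⟨c, _ | ⟨d, u⟩⟩ <;> simp at h2
  simp only [List.getD_cons_zero, List.getD_cons_succ] at hcase
  by_cases hc : min c d > max a b ∨ min a b > max c d
  · rw [pvADisj a b c d t u hc, pvBDisj a b c d t u hc]
  · have hc' := hc
    push Not at hc'
    have hpq : max (min a b) (min c d) ≤ min (max a b) (max c d) := by omega
    have heven : ((a :: b :: t).length + (c :: d :: u).length) % 2 = 0 := by
      rcases hcase with h | h | h
      · omega
      · omega
      · exact h
    rw [pvAOver a b c d t u hc, pvBOver a b c d t u hc]
    rw [pvSortedMerged ((a :: b :: t) ++ (c :: d :: u)) _ _ hpq]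
    have hw : ((a :: b :: t) ++ (c :: d :: u)).length % 2 = 0 := by
      simp only [List.length_append, List.length_cons]
      simp only [List.length_cons] at heven
      omega
    rw [pvPairLoop_even _ (pvMergedLen _ _ _ hw)]
    rfl
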